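-- pv_equiv track=rewrite | github.com/treyhunner/countdown-cli | src/countdown/__main__.py | get_number_lines
-- ===== SOURCE A (Python) =====
-- CHARS = {
--     "0": "██████\n██  ██\n██  ██\n██  ██\n██████",
--     "1": "   ██ \n  ███ \n   ██ \n   ██ \n   ██ ",
--     "2": "██████\n    ██\n██████\n██    \n██████",
--     "3": "██████\n    ██\n █████\n    ██\n██████",
--     "4": "██  ██\n██  ██\n██████\n    ██\n    ██",
--     "5": "██████\n██    \n██████\n    ██\n██████",
--     "6": "██████\n██    \n██████\n██  ██\n██████",
--     "7": "██████\n    ██\n   ██ \n  ██  \n  ██  ",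
--     "8": " ████ \n██  ██\n ████ \n██  ██\n ████ ",
--     "9": "██████\n██  ██\n██████\n    ██\n █████",
--     ":": "  \n██\n  \n██\n  ",
-- }
--
-- def get_number_lines(seconds: int) -> list[str]:
--     """Return list of lines which make large MM:SS glyphs for given seconds."""
--     lines = [""] * 5
--     minutes, seconds = divmod(seconds, 60)
--     time = f"{minutes:02d}:{seconds:02d}"
--     for char in time:
--         char_lines = CHARS[char].splitlines()
--         for i, line in enumerate(char_lines):
--             lines[i] += line + " "
--     return lines
-- ===== SOURCE B (Python) =====
-- # Bitmap font: each glyph row is a small integer whose bits (MSB first) mark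
-- # filled columns; rows are rendered by bit-testing instead of splitting strings.
-- FONT = {
--     "0": (0b111111, 0b110011, 0b110011, 0b110011, 0b111111),
--     "1": (0b000110, 0b001110, 0b000110, 0b000110, 0b000110),
--     "2": (0b111111, 0b000011, 0b111111, 0b110000, 0b111111),
--     "3": (0b111111, 0b000011, 0b011111, 0b000011, 0b111111),
--     "4": (0b110011, 0b110011, 0b111111, 0b000011, 0b000011),
--     "5": (0b111111, 0b110000, 0b111111, 0b000011, 0b111111),
--     "6": (0b111111, 0b110000, 0b111111, 0b110011, 0b111111),
--     "7": (0b111111, 0b000011, 0b000110, 0b001100, 0b001100),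
--     "8": (0b011110, 0b110011, 0b011110, 0b110011, 0b011110),
--     "9": (0b111111, 0b110011, 0b111111, 0b000011, 0b011111),
--     ":": (0b00, 0b11, 0b00, 0b11, 0b00),
-- }
--
--
-- def get_number_lines(seconds: int) -> list[str]:
--     """Return list of lines which make large MM:SS glyphs for given seconds."""
--     minutes, seconds = divmod(seconds, 60)
--     time = f"{minutes:02d}:{seconds:02d}"
--     rows = []
--     for i in range(5):
--         parts = []
--         for ch in time:
--             bits = FONT[ch][i]
--             width = 2 if ch == ":" else 6
--             parts.append("".join(
--                 "█" if bits >> (width - 1 - k) & 1 else " " for k in range(width)))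
--             parts.append(" ")
--         rows.append("".join(parts))
--     return rows
-- ===== Notes on version B (the rewrite author's own statement) =====
-- stated objective: alternative
-- what changed: B replaces the string glyph table and splitlines with a bitmap font of per-row integers, rendering each output row by bit-testing the columns of each character instead of concatenating pre-drawn glyph lines.
import Mathlib
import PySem

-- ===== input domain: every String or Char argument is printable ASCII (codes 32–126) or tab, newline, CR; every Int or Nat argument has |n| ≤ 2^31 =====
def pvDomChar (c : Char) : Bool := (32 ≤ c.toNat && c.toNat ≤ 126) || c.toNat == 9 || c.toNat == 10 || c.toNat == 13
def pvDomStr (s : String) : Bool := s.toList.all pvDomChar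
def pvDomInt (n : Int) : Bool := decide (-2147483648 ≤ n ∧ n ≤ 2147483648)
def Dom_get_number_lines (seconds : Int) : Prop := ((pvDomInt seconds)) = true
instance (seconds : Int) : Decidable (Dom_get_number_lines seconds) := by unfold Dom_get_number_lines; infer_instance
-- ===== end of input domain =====

-- B renders the glyphs from a bitmap font (one integer of column bits per glyph row)
-- by bit-testing, instead of A's splitlines over a pre-drawn string table; same cost.

-- the module constant CHARS of A; characters outside the table raise KeyError in
-- Python (excluded by Pre_), the "" default is never reached on admitted inputs
def pvCHARS (c : Char) : String :=
  if c = '0' then "██████\n██  ██\n██  ██\n██  ██\n██████"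
  else if c = '1' then "   ██ \n  ███ \n   ██ \n   ██ \n   ██ "
  else if c = '2' then "██████\n    ██\n██████\n██    \n██████"
  else if c = '3' then "██████\n    ██\n █████\n    ██\n██████"
  else if c = '4' then "██  ██\n██  ██\n██████\n    ██\n    ██"
  else if c = '5' then "██████\n██    \n██████\n    ██\n██████"
  else if c = '6' then "██████\n██    \n██████\n██  ██\n██████"
  else if c = '7' then "██████\n    ██\n   ██ \n  ██  \n  ██  "
  else if c = '8' then " ████ \n██  ██\n ████ \n██  ██\n ████ "
  else if c = '9' then "██████\n██  ██\n██████\n    ██\n █████"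
  else if c = ':' then "  \n██\n  \n██\n  "
  else ""

-- f"{n:02d}": zero-pad str(n) to width 2 (pad happens only for single-char reprs)
def pvFmt2 (n : Int) : String :=
  if PySem.Str.len (PySem.Int.toStr n) < 2 then "0" ++ PySem.Int.toStr n
  else PySem.Int.toStr n

-- ===== PORT A =====
def get_number_lines (seconds : Int) : List String :=
  let lines : List String := ["", "", "", "", ""]
  let minutes := PySem.Int.floordiv seconds 60
  let secs := PySem.Int.mod seconds 60
  let time := pvFmt2 minutes ++ ":" ++ pvFmt2 secs
  time.toList.foldl (fun lines c =>
    let char_lines := PySem.Str.splitlines (pvCHARS c)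
    -- enumerate indices are nonnegative, so .toNat is exact here
    (PySem.List.enumerate char_lines).foldl
      (fun ls p => ls.set p.1.toNat ((ls.getD p.1.toNat "") ++ p.2 ++ " ")) lines) lines

-- ===== PORT B =====
-- B's module constant FONT: per glyph, five integers of column bits (MSB = left column)
def pvFONT (c : Char) : List Nat :=
  if c = '0' then [0b111111, 0b110011, 0b110011, 0b110011, 0b111111]
  else if c = '1' then [0b000110, 0b001110, 0b000110, 0b000110, 0b000110]
  else if c = '2' then [0b111111, 0b000011, 0b111111, 0b110000, 0b111111]
  else if c = '3' then [0b111111, 0b000011, 0b011111, 0b000011, 0b111111]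
  else if c = '4' then [0b110011, 0b110011, 0b111111, 0b000011, 0b000011]
  else if c = '5' then [0b111111, 0b110000, 0b111111, 0b000011, 0b111111]
  else if c = '6' then [0b111111, 0b110000, 0b111111, 0b110011, 0b111111]
  else if c = '7' then [0b111111, 0b000011, 0b000110, 0b001100, 0b001100]
  else if c = '8' then [0b011110, 0b110011, 0b011110, 0b110011, 0b011110]
  else if c = '9' then [0b111111, 0b110011, 0b111111, 0b000011, 0b011111]
  else if c = ':' then [0b00, 0b11, 0b00, 0b11, 0b00]
  else []

-- the "".join(... for k in range(width)) of Source B's inner generator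
def pvRender (ch : Char) (i : Nat) : String :=
  let bits := (pvFONT ch).getD i 0
  let width : Nat := if ch = ':' then 2 else 6
  PySem.Str.join "" ((List.range width).map
    (fun k => if (bits >>> (width - 1 - k)) &&& 1 ≠ 0 then "█" else " "))

def get_number_lines_alt (seconds : Int) : List String :=
  let minutes := PySem.Int.floordiv seconds 60
  let secs := PySem.Int.mod seconds 60
  let time := pvFmt2 minutes ++ ":" ++ pvFmt2 secs
  (List.range 5).map (fun i =>
    -- the parts list: two appends per character of time
    PySem.Str.join "" (time.toList.flatMap (fun ch => [pvRender ch i, " "])))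

-- ===== PRECONDITION & SPEC =====
-- Python raises KeyError on negative seconds (the minutes field then contains '-')
def Pre_get_number_lines (seconds : Int) : Prop := 0 ≤ seconds
instance (seconds : Int) : Decidable (Pre_get_number_lines seconds) := by
  unfold Pre_get_number_lines; infer_instance

def pvWitness_get_number_lines : Int := (83)

def Spec_get_number_lines (seconds : Int) (out : List String) : Prop := out = get_number_lines_alt seconds
instance (seconds : Int) (out : List String) : Decidable (Spec_get_number_lines seconds out) := by unfold Spec_get_number_lines; infer_instance

-- ===== CLAIM (what is proved, stated in full; the proofs are below) =====
def Claim_equal_get_number_lines : Prop := ∀ (seconds : Int), Dom_get_number_lines seconds → Pre_get_number_lines seconds → Spec_get_number_lines seconds (get_number_lines seconds)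

-- ===== LEMMAS AND PROOFS =====

-- the characters CHARS has glyphs for
def pvKeys : List Char := ['0','1','2','3','4','5','6','7','8','9',':']

-- the i-th glyph line of character c, as A reads it
def pvSeg (i : Nat) (c : Char) : String :=
  (PySem.Str.splitlines (pvCHARS c)).getD i ""

-- row i of the final picture, for the character list cs
def pvRow (i : Nat) (cs : List Char) : String :=
  PySem.Str.join "" (cs.flatMap (fun c => [pvSeg i c, " "]))

-- the bitmap rendering agrees with A's glyph table on every key and row
lemma pvRender_eq_seg (c : Char) (hc : c ∈ pvKeys) (i : Nat) (hi : i < 5) :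
    pvRender c i = pvSeg i c := by
  simp only [pvKeys, List.mem_cons, List.not_mem_nil, or_false] at hc
  interval_cases i <;>
    rcases hc with rfl|rfl|rfl|rfl|rfl|rfl|rfl|rfl|rfl|rfl|rfl <;> rfl

lemma pvInner (c : Char) (hc : c ∈ pvKeys) (l0 l1 l2 l3 l4 : String) :
    (PySem.List.enumerate (PySem.Str.splitlines (pvCHARS c))).foldl
      (fun ls p => ls.set p.1.toNat ((ls.getD p.1.toNat "") ++ p.2 ++ " "))
      [l0, l1, l2, l3, l4]
    = [l0 ++ pvSeg 0 c ++ " ", l1 ++ pvSeg 1 c ++ " ", l2 ++ pvSeg 2 c ++ " ",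
       l3 ++ pvSeg 3 c ++ " ", l4 ++ pvSeg 4 c ++ " "] := by
  simp only [pvKeys, List.mem_cons, List.not_mem_nil, or_false] at hc
  rcases hc with rfl|rfl|rfl|rfl|rfl|rfl|rfl|rfl|rfl|rfl|rfl <;> rfl

lemma pvRow_nil (i : Nat) : pvRow i [] = "" := rfl

lemma pvRow_cons (i : Nat) (c : Char) (cs : List Char) :
    pvRow i (c :: cs) = (pvSeg i c ++ " ") ++ pvRow i cs := by
  apply String.toList_inj.mp
  cases cs with
  | nil =>
    simp [pvRow, PySem.Str.toList_join, PySem.Chars.join_cons_cons,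
      PySem.Chars.join_singleton, String.toList_append]
  | cons d ds =>
    simp [pvRow, PySem.Str.toList_join, PySem.Chars.join_cons_cons, String.toList_append]

lemma pvAfold (cs : List Char) (h : ∀ c ∈ cs, c ∈ pvKeys) :
    ∀ l0 l1 l2 l3 l4 : String,
    cs.foldl (fun lines c =>
      (PySem.List.enumerate (PySem.Str.splitlines (pvCHARS c))).foldl
        (fun ls p => ls.set p.1.toNat ((ls.getD p.1.toNat "") ++ p.2 ++ " ")) lines)
      [l0, l1, l2, l3, l4]
    = [l0 ++ pvRow 0 cs, l1 ++ pvRow 1 cs, l2 ++ pvRow 2 cs,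
       l3 ++ pvRow 3 cs, l4 ++ pvRow 4 cs] := by
  induction cs with
  | nil =>
    intro l0 l1 l2 l3 l4
    simp [pvRow_nil]
  | cons c cs ih =>
    intro l0 l1 l2 l3 l4
    rw [List.foldl_cons, pvInner c (h c (List.mem_cons_self ..)),
      ih (fun d hd => h d (List.mem_cons_of_mem _ hd))]
    simp [pvRow_cons, String.append_assoc]

-- B's five rows, written through pvRow (needs the render = table lemma memberwise)
lemma pvB_eq_rows (cs : List Char) (h : ∀ c ∈ cs, c ∈ pvKeys) :
    (List.range 5).map (fun i =>
      PySem.Str.join "" (cs.flatMap (fun ch => [pvRender ch i, " "])))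
    = [pvRow 0 cs, pvRow 1 cs, pvRow 2 cs, pvRow 3 cs, pvRow 4 cs] := by
  have key : ∀ i < 5,
      PySem.Str.join "" (cs.flatMap (fun ch => [pvRender ch i, " "])) = pvRow i cs := by
    intro i hi
    unfold pvRow
    congr 1
    apply List.flatMap_congr
    intro c hc
    rw [pvRender_eq_seg c (h c hc) i hi]
  have h5 : List.range 5 = [0, 1, 2, 3, 4] := rfl
  rw [h5]
  simp only [List.map]
  rw [key 0 (by norm_num), key 1 (by norm_num), key 2 (by norm_num),
    key 3 (by norm_num), key 4 (by norm_num)]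

lemma pvDigitChar_mem (m : Nat) (h : m < 10) : m.digitChar ∈ pvKeys := by
  interval_cases m <;> decide

lemma pvToDigitsCore_mem (fuel : Nat) :
    ∀ (n : Nat) (acc : List Char) (c : Char),
      c ∈ Nat.toDigitsCore 10 fuel n acc → c ∈ acc ∨ c ∈ pvKeys := by
  induction fuel with
  | zero =>
    intro n acc c h
    simp [Nat.toDigitsCore] at h
    exact Or.inl h
  | succ fuel ih =>
    intro n acc c h
    simp only [Nat.toDigitsCore] at h
    split_ifs at h with hdiv
    · rcases List.mem_cons.mp h with rfl | h
      · exact Or.inr (pvDigitChar_mem _ (Nat.mod_lt _ (by norm_num)))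
      · exact Or.inl h
    · rcases ih _ _ _ h with h' | h'
      · rcases List.mem_cons.mp h' with rfl | h''
        · exact Or.inr (pvDigitChar_mem _ (Nat.mod_lt _ (by norm_num)))
        · exact Or.inl h''
      · exact Or.inr h'

lemma pvFmt2_mem (n : Int) (hn : 0 ≤ n) (c : Char) (hc : c ∈ (pvFmt2 n).toList) :
    c ∈ pvKeys := by
  have hdig : ∀ d ∈ (PySem.Int.toStr n).toList, d ∈ pvKeys := by
    intro d hd
    rw [PySem.Int.toList_toStr] at hd
    simp only [PySem.Int.toChars, if_neg (by omega : ¬ n < 0)] at hd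
    rcases pvToDigitsCore_mem _ _ _ _ hd with h' | h'
    · simp at h'
    · exact h'
  unfold pvFmt2 at hc
  split_ifs at hc
  · rw [String.toList_append] at hc
    rcases List.mem_append.mp hc with h' | h'
    · simp at h'; subst h'; decide
    · exact hdig _ h'
  · exact hdig _ hc

-- ===== VERDICT (by name: the statement is the Claim_ definition above) =====
theorem get_number_lines_spec : Claim_equal_get_number_lines := by
  intro seconds _ hpre
  unfold Spec_get_number_lines get_number_lines get_number_lines_alt
  have hmin : 0 ≤ PySem.Int.floordiv seconds 60 := by
    rw [PySem.Int.floordiv_eq_ediv_of_pos (by norm_num)]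
    exact Int.ediv_nonneg hpre (by norm_num)
  have hsec : 0 ≤ PySem.Int.mod seconds 60 := PySem.Int.mod_nonneg _ (by norm_num)
  have hmem : ∀ c ∈ (pvFmt2 (PySem.Int.floordiv seconds 60) ++ ":" ++
      pvFmt2 (PySem.Int.mod seconds 60)).toList, c ∈ pvKeys := by
    intro c hc
    rw [String.toList_append, String.toList_append] at hc
    rcases List.mem_append.mp hc with h' | h'
    · rcases List.mem_append.mp h' with h'' | h''
      · exact pvFmt2_mem _ hmin _ h''
      · simp at h''; subst h''; decide
    · exact pvFmt2_mem _ hsec _ h'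
  rw [pvAfold _ hmem, pvB_eq_rows _ hmem]
  simp
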